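-- pv_equiv track=rewrite | github.com/sehoon787/autopolio | api/services/template_exporter.py | _group_projects_by_company
-- ===== SOURCE A (Python) =====
-- from typing import Tuple, Dict, Any, List, Optional
--
-- def _group_projects_by_company(projects: List[Dict[str, Any]]) -> Dict[str, List[Dict[str, Any]]]:
--     """Group projects by company name"""
--     company_projects = {}
--     for proj in projects:
--         company = proj.get("company_name") or proj.get("company") or ""
--         if company not in company_projects:
--             company_projects[company] = []
--         company_projects[company].append(proj)
--     return company_projects
-- ===== SOURCE B (Python) =====
-- from typing import Tuple, Dict, Any, List, Optional
--
-- def _group_projects_by_company(projects: List[Dict[str, Any]]) -> Dict[str, List[Dict[str, Any]]]: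
--     """Group projects by company name: dedup the keys in first-occurrence
--     order, then build each group with a per-key filter comprehension."""
--     def key(p):
--         return p.get("company_name") or p.get("company") or ""
--     keys = list(dict.fromkeys(key(p) for p in projects))
--     return {k: [p for p in projects if key(p) == k] for k in keys}
-- ===== Notes on version B (the rewrite author's own statement) =====
-- stated objective: alternative
-- what changed: A grows a dict of lists in one accumulating pass; B first computes the distinct company keys in first-occurrence order (dict.fromkeys) and then builds each group by filtering the input list per key - two passes with no mutable accumulator.
import Mathlib
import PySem

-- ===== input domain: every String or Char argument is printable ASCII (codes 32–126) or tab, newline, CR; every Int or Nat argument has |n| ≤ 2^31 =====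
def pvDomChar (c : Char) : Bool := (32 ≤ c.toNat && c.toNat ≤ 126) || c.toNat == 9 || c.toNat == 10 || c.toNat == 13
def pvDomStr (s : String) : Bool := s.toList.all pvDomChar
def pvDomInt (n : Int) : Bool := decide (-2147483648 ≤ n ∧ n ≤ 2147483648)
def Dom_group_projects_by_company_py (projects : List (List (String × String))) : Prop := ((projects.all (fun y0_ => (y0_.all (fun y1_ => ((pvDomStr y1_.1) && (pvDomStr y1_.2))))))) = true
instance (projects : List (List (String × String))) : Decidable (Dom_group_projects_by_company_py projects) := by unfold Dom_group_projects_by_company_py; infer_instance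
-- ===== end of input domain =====

-- B computes the same grouping by a different decomposition (ordered key dedup + per-key filter); no speed claim.

-- ===== PORT A =====
-- proj.get("company_name") or proj.get("company") or ""  (Python `or`: None and "" are falsy)
def pvKey (proj : List (String × String)) : String :=
  match (PySem.Dict.mk proj).get? "company_name" with
  | some s => if s = "" then (match (PySem.Dict.mk proj).get? "company" with
                              | some t => if t = "" then "" else t
                              | none => "")
              else s
  | none => (match (PySem.Dict.mk proj).get? "company" with
             | some t => if t = "" then "" else t
             | none => "")

def group_projects_by_company_py (projects : List (List (String × String))) : List (String × List (List (String × String))) :=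
  (projects.foldl (fun d proj =>
      let company := pvKey proj
      let d := if d.contains company then d else d.insert company []
      d.modify company [] (fun l => l ++ [proj]))
    PySem.Dict.empty).items

-- ===== PORT B =====
def group_projects_by_company_py_alt (projects : List (List (String × String))) : List (String × List (List (String × String))) :=
  let keys := PySem.List.dedup (projects.map pvKey)
  keys.map (fun k => (k, projects.filter (fun p => pvKey p == k)))

-- ===== PRECONDITION & SPEC =====
def Spec_group_projects_by_company_py (projects : List (List (String × String))) (out : List (String × List (List (String × String)))) : Prop := out = group_projects_by_company_py_alt projects
instance (projects : List (List (String × String))) (out : List (String × List (List (String × String)))) : Decidable (Spec_group_projects_by_company_py projects out) := by unfold Spec_group_projects_by_company_py; infer_instance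

-- ===== CLAIM (what is proved, stated in full; the proofs are below) =====
def Claim_equal_group_projects_by_company_py : Prop := ∀ (projects : List (List (String × String))), Dom_group_projects_by_company_py projects → Spec_group_projects_by_company_py projects (group_projects_by_company_py projects)

-- ===== LEMMAS AND PROOFS =====

-- A's "ensure the key exists, then append" step is a single `modify`.
theorem pvStepA_eq (d : PySem.Dict String (List (List (String × String)))) (k : String) (proj : List (String × String)) :
    (if d.contains k then d else d.insert k []).modify k [] (fun l => l ++ [proj])
      = d.modify k [] (fun l => l ++ [proj]) := by
  by_cases h : d.contains k = true
  · simp [h]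
  · have h' : d.contains k = false := eq_false_of_ne_true h
    simp only [h', Bool.false_eq_true, if_false]
    simp [PySem.Dict.modify, PySem.Dict.getD_insert_self,
      PySem.Dict.getD_of_not_contains d ([] : List (List (String × String))) h',
      PySem.Dict.insert_insert_self]

theorem pvFoldA_eq (projects : List (List (String × String))) :
    projects.foldl (fun d proj =>
        let company := pvKey proj
        let d := if d.contains company then d else d.insert company []
        d.modify company [] (fun l => l ++ [proj])) PySem.Dict.empty
      = (projects.map (fun p => (pvKey p, p))).foldl
          (fun d q => d.modify q.1 [] (fun l => l ++ [q.2])) PySem.Dict.empty := by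
  rw [List.foldl_map]
  exact PySem.List.foldl_congr_mem projects _ _ _ (fun d p _ => pvStepA_eq d (pvKey p) p)

-- ===== VERDICT (by name: the statement is the Claim_ definition above) =====
theorem group_projects_by_company_py_spec : Claim_equal_group_projects_by_company_py := by
  intro projects _
  unfold Spec_group_projects_by_company_py group_projects_by_company_py group_projects_by_company_py_alt
  rw [pvFoldA_eq]
  set l := projects.map (fun p => (pvKey p, p)) with hl
  set D := l.foldl (fun d q => d.modify q.1 [] (fun l => l ++ [q.2])) PySem.Dict.empty with hD
  have hnd : D.keys.Nodup := by
    rw [hD]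
    exact PySem.Dict.nodup_keys_foldl_modify_key l (fun q => q.1) [] _ _ PySem.Dict.nodup_keys_empty
  rw [PySem.Dict.items_eq_map_keys D hnd []]
  have hkeys : D.keys = PySem.List.dedup (projects.map pvKey) := by
    rw [hD, PySem.Dict.keys_foldl_modify_key]
    simp [hl, PySem.Set.update_nil_left, PySem.List.dedup_eq_ofList, List.map_map, Function.comp_def]
  rw [hkeys]
  apply List.map_congr_left
  intro k _
  have hg : D.getD k [] = (l.filter (fun p => p.1 == k)).map (fun p => p.2) := by
    rw [hD]
    simpa using PySem.Dict.getD_foldl_modify_append l PySem.Dict.empty k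
  rw [hg, hl, List.filter_map]
  simp [Function.comp_def]
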